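-- pv_equiv track=rewrite | github.com/981377660LMT/algorithm-study | 11_动态规划/经典题/LCP 65. 舒适的湿度-位运算dp.py | unSuitability
-- ===== SOURCE A (Python) =====
-- from typing import List
--
-- def unSuitability(nums: List[int]) -> int:
--     """二分答案 + dp O(nUlogU)"""
--
--     # def check(mid: int) -> bool:
--     #     """
--     #     给数组元素添加正负号后,max(preSum) - min(preSum) <= mid 是否成立
--     #     """
--     #     dp = set(range(mid + 1))
--     #     for num in nums:
--     #         ndp = set()
--     #         for pre in dp:
--     #             if pre + num <= mid:
--     #                 ndp.add(pre + num)
--     #             if pre - num >= 0: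
--     #                 ndp.add(pre - num)
--     #         dp = ndp
--     #     return len(dp) > 0
--
--     def check(mid: int) -> bool:
--         """
--         给数组元素添加正负号后,max(preSum) - min(preSum) <= mid 是否成立
--         """
--         mask = (1 << (mid + 1)) - 1
--         dp = mask
--         for num in nums:
--             dp = ((dp << num) | (dp >> num)) & mask
--         return dp != 0
--
--     left, right = 0, max(nums) * 2
--     while left <= right:
--         mid = (left + right) // 2
--         if check(mid):
--             right = mid - 1
--         else:
--             left = mid + 1
--     return left
-- ===== SOURCE B (Python) =====
-- def unSuitability(nums):
--     """Direct DP: state = prefix offset above the running minimum, value = minimal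
--     (max-min) span so far; one pass, no binary search, states pruned to span <= 2*max."""
--     cap = 2 * max(nums)
--     dp = {0: 0}  # offset (cur - min prefix) -> minimal span (max prefix - min prefix)
--     for num in nums:
--         ndp = {}
--         for o, s in dp.items():
--             for no, ns in ((o + num, max(s, o + num)),
--                            (o - num, s) if o - num >= 0 else (0, s + num - o)):
--                 if ns <= cap and (no not in ndp or ns < ndp[no]):
--                     ndp[no] = ns
--         dp = ndp
--     return min(dp.values())
-- ===== Notes on version B (the rewrite author's own statement) =====
-- stated objective: alternative
-- what changed: replaces A's binary search over the answer with a bitmask feasibility check per probe by a single direct DP pass over dict states (prefix offset above the running minimum -> minimal span so far), returning the minimum span directly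
-- outside the precondition, e.g. on unSuitability([-1]): A returns 0, B raises ValueError; on unSuitability([-2, -1]): A returns 0, B raises ValueError
import Mathlib
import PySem

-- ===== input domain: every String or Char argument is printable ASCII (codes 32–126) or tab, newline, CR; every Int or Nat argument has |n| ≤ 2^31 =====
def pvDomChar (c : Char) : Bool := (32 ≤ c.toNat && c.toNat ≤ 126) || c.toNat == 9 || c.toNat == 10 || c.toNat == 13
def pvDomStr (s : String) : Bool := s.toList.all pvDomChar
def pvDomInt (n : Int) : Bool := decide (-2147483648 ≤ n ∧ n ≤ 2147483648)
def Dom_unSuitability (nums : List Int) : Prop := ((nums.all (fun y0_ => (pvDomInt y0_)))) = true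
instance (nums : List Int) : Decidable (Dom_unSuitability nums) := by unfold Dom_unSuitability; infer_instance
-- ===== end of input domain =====

-- B replaces A's binary search + bitmask feasibility check by one direct DP pass over
-- dict states (prefix offset above the running minimum -> minimal span); alternative
-- algorithm, proved to return the same value on the stated domain.


-- ===== PORT A =====
-- check(mid): bitset dp of admissible shifted prefix values, folded over nums
def pvCheckA (nums : List Int) (mid : Int) : Bool :=
  let mask : Nat := (1 <<< (mid + 1).toNat) - 1
  let dp : Nat := nums.foldl (fun dp num => ((dp <<< num.toNat) ||| (dp >>> num.toNat)) &&& mask) mask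
  decide (dp ≠ 0)

-- the while-loop binary search: left/right updated until left > right, returns left
def pvBsA (nums : List Int) (left right : Int) : Int :=
  if h : left ≤ right then
    let mid := PySem.Int.floordiv (left + right) 2
    if pvCheckA nums mid then pvBsA nums left (mid - 1)
    else pvBsA nums (mid + 1) right
  else left
termination_by (right + 1 - left).toNat
decreasing_by
  · have hm := PySem.Int.floordiv_two_mid_bounds h
    omega
  · have hm := PySem.Int.floordiv_two_mid_bounds h
    omega

def unSuitability (nums : List Int) : Int :=
  -- max(nums): ValueError on [], excluded by Pre_
  let mx := (PySem.List.max? nums (fun x => x)).getD 0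
  pvBsA nums 0 (mx * 2)

-- ===== PORT B =====
-- the two sign-choice successor states of (offset above running min, span)
def pvCand (num : Int) (p : Int × Int) : List (Int × Int) :=
  [(p.1 + num, max p.2 (p.1 + num)),
   if 0 ≤ p.1 - num then (p.1 - num, p.2) else (0, p.2 + num - p.1)]

-- 'if ns <= cap and (no not in ndp or ns < ndp[no]): ndp[no] = ns'
def pvIns (cap : Int) (d : PySem.Dict Int Int) (c : Int × Int) : PySem.Dict Int Int :=
  if c.2 ≤ cap then
    match d.get? c.1 with
    | none => d.insert c.1 c.2
    | some v => if c.2 < v then d.insert c.1 c.2 else d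
  else d

-- body of the inner 'for o, s in dp.items()' loop
def pvStepB (cap num : Int) (d : PySem.Dict Int Int) (p : Int × Int) : PySem.Dict Int Int :=
  (pvCand num p).foldl (pvIns cap) d

def unSuitability_alt (nums : List Int) : Int :=
  -- max(nums) / min(dp.values()): ValueError outside Pre_
  let cap := 2 * ((PySem.List.max? nums (fun x => x)).getD 0)
  let dp0 : PySem.Dict Int Int := PySem.Dict.ofList [(0, 0)]
  let dp := nums.foldl (fun dp num => dp.items.foldl (pvStepB cap num) PySem.Dict.empty) dp0
  (PySem.List.min? dp.values (fun x => x)).getD 0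

-- ===== PRECONDITION & SPEC =====
-- Pre_ excludes the empty list (A's max() raises ValueError) and lists containing a
-- negative element: with a nonnegative maximum A's shift by a negative count raises
-- ValueError, and on all-negative lists B's own DP raises ValueError (empty state set).
def Pre_unSuitability (nums : List Int) : Prop := nums ≠ [] ∧ ∀ n ∈ nums, 0 ≤ n
instance (nums : List Int) : Decidable (Pre_unSuitability nums) := by unfold Pre_unSuitability; infer_instance
def pvWitness_unSuitability : List Int := [1, 2]

def Spec_unSuitability (nums : List Int) (out : Int) : Prop := out = unSuitability_alt nums
instance (nums : List Int) (out : Int) : Decidable (Spec_unSuitability nums out) := by unfold Spec_unSuitability; infer_instance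

-- ===== CLAIM (what is proved, stated in full; the proofs are below) =====
def Claim_equal_unSuitability : Prop := ∀ (nums : List Int), Dom_unSuitability nums → Pre_unSuitability nums → Spec_unSuitability nums (unSuitability nums)

-- ===== LEMMAS AND PROOFS =====

-- reachable (offset above running min, span) profiles after processing nums: the
-- semantic middle ground both ports are related to
def pvProfs (nums : List Int) : List (Int × Int) :=
  nums.foldl (fun ps n => ps.flatMap (pvCand n)) [(0, 0)]

-- well-formedness of a state
def pvOk (p : Int × Int) : Prop := 0 ≤ p.1 ∧ p.1 ≤ p.2

-- the x admissible for profile p at tolerance mid (= bit x of A's bitset)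
def pvC (mid : Int) (p : Int × Int) (x : Nat) : Prop :=
  p.2 ≤ mid ∧ p.1 ≤ (x : Int) ∧ (x : Int) ≤ mid - p.2 + p.1

-- the B-side loop invariant: dict entries are reachable profiles (with minimal span
-- per offset) and every reachable profile within the cap is dominated by an entry
def pvInv (cap : Int) (dp : PySem.Dict Int Int) (ps : List (Int × Int)) : Prop :=
  dp.keys.Nodup ∧
  (∀ k w, dp.get? k = some w → (k, w) ∈ ps ∧ w ≤ cap) ∧
  (∀ p ∈ ps, p.2 ≤ cap → ∃ w, dp.get? p.1 = some w ∧ w ≤ p.2)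

theorem pvCand_ok {num : Int} (hnum : 0 ≤ num) {p : Int × Int} (hp : pvOk p) :
    ∀ q ∈ pvCand num p, pvOk q := by
  obtain ⟨h1, h2⟩ := hp
  intro q hq
  simp only [pvCand, List.mem_cons, List.mem_singleton] at hq
  rcases hq with rfl | hq
  · exact ⟨by omega, by rcases max_cases p.2 (p.1 + num) with ⟨h, _⟩ | ⟨h, _⟩ <;> omega⟩
  · split at hq <;> simp at hq <;> subst hq <;> constructor <;> simp_all <;> omega

theorem pvCand_span_mono {num : Int} (hnum : 0 ≤ num) {p : Int × Int} (hp : pvOk p) :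
    ∀ q ∈ pvCand num p, p.2 ≤ q.2 := by
  obtain ⟨h1, h2⟩ := hp
  intro q hq
  simp only [pvCand, List.mem_cons, List.mem_singleton] at hq
  rcases hq with rfl | hq
  · exact le_max_left _ _
  · split at hq <;> simp at hq <;> subst hq <;> simp_all <;> omega

theorem pvCand_mono {num o s s' : Int} (h : s' ≤ s) :
    ∀ q ∈ pvCand num (o, s), ∃ c ∈ pvCand num (o, s'), c.1 = q.1 ∧ c.2 ≤ q.2 := by
  intro q hq
  simp only [pvCand, List.mem_cons, List.mem_singleton] at hq
  rcases hq with rfl | hq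
  · exact ⟨(o + num, max s' (o + num)), by simp [pvCand], rfl, by simp; omega⟩
  · by_cases hb : (0 : Int) ≤ o - num
    · rw [if_pos hb] at hq
      have hq' : q = (o - num, s) := by simpa using hq
      subst hq'
      refine ⟨(o - num, s'), ?_, rfl, h⟩
      unfold pvCand; rw [if_pos hb]; simp
    · rw [if_neg hb] at hq
      have hq' : q = (0, s + num - o) := by simpa using hq
      subst hq'
      refine ⟨(0, s' + num - o), ?_, rfl, by omega⟩
      unfold pvCand; rw [if_neg hb]; simp

theorem pvProfs_ok {nums : List Int} (h : ∀ n ∈ nums, 0 ≤ n) :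
    ∀ p ∈ pvProfs nums, pvOk p := by
  suffices H : ∀ (nums : List Int) (ps : List (Int × Int)), (∀ n ∈ nums, 0 ≤ n) →
      (∀ p ∈ ps, pvOk p) →
      ∀ p ∈ nums.foldl (fun ps n => ps.flatMap (pvCand n)) ps, pvOk p by
    exact H nums [(0, 0)] h (by intro p hp; simp at hp; subst hp; exact ⟨le_refl 0, le_refl 0⟩)
  intro nums
  induction nums with
  | nil => intro ps _ hps; simpa using hps
  | cons a t ih =>
    intro ps hn hps
    refine ih _ (fun n hn' => hn n (List.mem_cons_of_mem _ hn')) ?_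
    intro p hp
    rw [List.mem_flatMap] at hp
    obtain ⟨q, hq, hpq⟩ := hp
    exact pvCand_ok (hn a (List.mem_cons_self ..)) (hps q hq) p hpq

theorem pvStepBits {num mid : Int} (hnum : 0 ≤ num) (hmid : 0 ≤ mid)
    {ps : List (Int × Int)} (hok : ∀ p ∈ ps, pvOk p) {dp : Nat}
    (hdp : ∀ x : Nat, dp.testBit x ↔ ∃ p ∈ ps, pvC mid p x) :
    ∀ x : Nat, (((dp <<< num.toNat) ||| (dp >>> num.toNat)) &&& ((1 <<< (mid + 1).toNat) - 1)).testBit x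
      ↔ ∃ p ∈ ps.flatMap (pvCand num), pvC mid p x := by
  intro x
  have hmask : ∀ y : Nat, ((1 <<< (mid + 1).toNat) - 1).testBit y = decide (y < (mid + 1).toNat) := by
    intro y; rw [Nat.shiftLeft_eq, one_mul]; exact Nat.testBit_two_pow_sub_one ..
  rw [Nat.testBit_and, Nat.testBit_or, Nat.testBit_shiftLeft, Nat.testBit_shiftRight, hmask]
  have hNn : (num.toNat : Int) = num := Int.toNat_of_nonneg hnum
  have hMn : (((mid + 1).toNat) : Int) = mid + 1 := Int.toNat_of_nonneg (by omega)
  constructor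
  · intro hbit
    simp only [Bool.and_eq_true, Bool.or_eq_true, decide_eq_true_eq] at hbit
    obtain ⟨hor, hx⟩ := hbit
    rcases hor with ⟨hNx, hb⟩ | hb
    · obtain ⟨p, hp, hC⟩ := (hdp (x - num.toNat)).mp hb
      obtain ⟨hpo, hps⟩ := hok p hp
      obtain ⟨c1, c2, c3⟩ := hC
      refine ⟨(p.1 + num, max p.2 (p.1 + num)), List.mem_flatMap.mpr ⟨p, hp, by simp [pvCand]⟩, ?_⟩
      refine ⟨?_, ?_, ?_⟩ <;>
        (rcases max_cases p.2 (p.1 + num) with ⟨hm, hm2⟩ | ⟨hm, hm2⟩ <;> rw [hm] <;> omega)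
    · obtain ⟨p, hp, hC⟩ := (hdp (num.toNat + x)).mp hb
      obtain ⟨hpo, hps⟩ := hok p hp
      obtain ⟨c1, c2, c3⟩ := hC
      by_cases hbr : (0 : Int) ≤ p.1 - num
      · refine ⟨(p.1 - num, p.2), List.mem_flatMap.mpr ⟨p, hp, ?_⟩, ?_, ?_, ?_⟩
        · unfold pvCand; rw [if_pos hbr]; simp
        all_goals omega
      · refine ⟨(0, p.2 + num - p.1), List.mem_flatMap.mpr ⟨p, hp, ?_⟩, ?_, ?_, ?_⟩
        · unfold pvCand; rw [if_neg hbr]; simp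
        all_goals omega
  · rintro ⟨q, hq, hC⟩
    obtain ⟨p, hp, hqc⟩ := List.mem_flatMap.mp hq
    obtain ⟨hpo, hps⟩ := hok p hp
    obtain ⟨hqo, hqs⟩ := pvCand_ok hnum ⟨hpo, hps⟩ q hqc
    obtain ⟨c1, c2, c3⟩ := hC
    simp only [Bool.and_eq_true, Bool.or_eq_true, decide_eq_true_eq]
    refine ⟨?_, by omega⟩
    simp only [pvCand, List.mem_cons, List.mem_singleton] at hqc
    rcases hqc with rfl | hqc
    · left
      have hxm : max p.2 (p.1 + num) ≤ mid := by
        rcases max_cases p.2 (p.1 + num) with ⟨hm, _⟩ | ⟨hm, _⟩ <;> omega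
      have h2 : p.2 ≤ mid := le_trans (le_max_left _ _) hxm
      refine ⟨by simp at c2 ⊢; omega, (hdp _).mpr ⟨p, hp, h2, ?_, ?_⟩⟩ <;>
        (simp only at c2 c3; rcases max_cases p.2 (p.1 + num) with ⟨hm, hm2⟩ | ⟨hm, hm2⟩ <;>
          rw [hm] at c3 <;> omega)
    · right
      by_cases hbr : (0 : Int) ≤ p.1 - num
      · rw [if_pos hbr] at hqc
        have hq' : q = (p.1 - num, p.2) := by simpa using hqc
        subst hq'
        exact (hdp _).mpr ⟨p, hp, by simp only at c1 c2 c3 ⊢; omega,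
          by simp only at c1 c2 c3 ⊢; omega, by simp only at c1 c2 c3 ⊢; omega⟩
      · rw [if_neg hbr] at hqc
        have hq' : q = (0, p.2 + num - p.1) := by simpa using hqc
        subst hq'
        exact (hdp _).mpr ⟨p, hp, by simp only at c1 c2 c3 ⊢; omega,
          by simp only at c1 c2 c3 ⊢; omega, by simp only at c1 c2 c3 ⊢; omega⟩

theorem pvFoldBits {mid : Int} (hmid : 0 ≤ mid) :
    ∀ (nums : List Int) (ps : List (Int × Int)) (dp : Nat),
      (∀ n ∈ nums, 0 ≤ n) → (∀ p ∈ ps, pvOk p) →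
      (∀ x : Nat, dp.testBit x ↔ ∃ p ∈ ps, pvC mid p x) →
      ∀ x : Nat,
        (nums.foldl (fun dp num => ((dp <<< num.toNat) ||| (dp >>> num.toNat)) &&& ((1 <<< (mid + 1).toNat) - 1)) dp).testBit x
        ↔ ∃ p ∈ nums.foldl (fun ps n => ps.flatMap (pvCand n)) ps, pvC mid p x := by
  intro nums
  induction nums with
  | nil => intro ps dp _ _ hdp x; exact hdp x
  | cons a t ih =>
    intro ps dp hn hok hdp x
    refine ih _ _ (fun n hn' => hn n (List.mem_cons_of_mem _ hn')) ?_
      (pvStepBits (hn a (List.mem_cons_self ..)) hmid hok hdp) x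
    intro p hp
    obtain ⟨q, hq, hpq⟩ := List.mem_flatMap.mp hp
    exact pvCand_ok (hn a (List.mem_cons_self ..)) (hok q hq) p hpq

theorem pvCheckA_iff {nums : List Int} (hn : ∀ n ∈ nums, 0 ≤ n) {mid : Int} (hmid : 0 ≤ mid) :
    pvCheckA nums mid = true ↔ ∃ p ∈ pvProfs nums, p.2 ≤ mid := by
  have hbits := pvFoldBits hmid nums [(0, 0)] ((1 <<< (mid + 1).toNat) - 1) hn
    (by intro p hp; simp at hp; subst hp; exact ⟨le_refl 0, le_refl 0⟩)
    (by
      intro x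
      rw [Nat.shiftLeft_eq, one_mul, Nat.testBit_two_pow_sub_one]
      have hMn : (((mid + 1).toNat) : Int) = mid + 1 := Int.toNat_of_nonneg (by omega)
      simp only [decide_eq_true_eq, pvC, List.mem_singleton]
      constructor
      · intro hx; exact ⟨(0, 0), rfl, hmid, by omega, by omega⟩
      · rintro ⟨p, rfl, _, h2, h3⟩; omega)
  simp only [pvCheckA, decide_eq_true_eq]
  constructor
  · intro hne
    obtain ⟨i, hi⟩ := Nat.exists_testBit_of_ne_zero hne
    obtain ⟨p, hp, h1, _, _⟩ := (hbits i).mp hi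
    exact ⟨p, hp, h1⟩
  · rintro ⟨p, hp, hle⟩
    obtain ⟨hpo, hps⟩ := pvProfs_ok hn p hp
    intro h0
    have := (hbits p.1.toNat).mpr ⟨p, hp, hle, by omega, by omega⟩
    rw [h0, Nat.zero_testBit] at this
    exact Bool.false_ne_true this

theorem pvCheckA_neg {nums : List Int} {mid : Int} (hmid : mid < 0) :
    pvCheckA nums mid = false := by
  have hm : (1 <<< (mid + 1).toNat) - 1 = 0 := by
    have : (mid + 1).toNat = 0 := by omega
    rw [this]; rfl
  have hz : ∀ (l : List Int), l.foldl (fun dp num => ((dp <<< num.toNat) ||| (dp >>> num.toNat)) &&& 0) 0 = 0 := by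
    intro l
    induction l with
    | nil => rfl
    | cons a t ih => simpa [Nat.and_zero] using ih
  simp only [pvCheckA, hm]
  rw [hz nums]
  simp

theorem pvCheckA_mono {nums : List Int} (hn : ∀ n ∈ nums, 0 ≤ n) {a b : Int} (hab : a ≤ b)
    (h : pvCheckA nums a = true) : pvCheckA nums b = true := by
  by_cases ha : 0 ≤ a
  · obtain ⟨p, hp, hle⟩ := (pvCheckA_iff hn ha).mp h
    exact (pvCheckA_iff hn (by omega)).mpr ⟨p, hp, by omega⟩
  · rw [pvCheckA_neg (by omega)] at h; exact absurd h (by simp)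

theorem pvProfs_cap {M : Int} (hM : 0 ≤ M) :
    ∀ (nums : List Int) (ps : List (Int × Int)),
      (∀ n ∈ nums, 0 ≤ n ∧ n ≤ M) →
      (∃ p ∈ ps, 0 ≤ p.1 ∧ p.1 ≤ 2 * M ∧ p.2 ≤ 2 * M) →
      ∃ p ∈ nums.foldl (fun ps n => ps.flatMap (pvCand n)) ps, 0 ≤ p.1 ∧ p.1 ≤ 2 * M ∧ p.2 ≤ 2 * M := by
  intro nums
  induction nums with
  | nil => intro ps _ hps; simpa using hps
  | cons a t ih =>
    intro ps hn hps
    obtain ⟨p, hp, h1, h2, h3⟩ := hps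
    obtain ⟨ha0, haM⟩ := hn a (List.mem_cons_self ..)
    refine ih _ (fun n hn' => hn n (List.mem_cons_of_mem _ hn')) ?_
    by_cases hbr : (0 : Int) ≤ p.1 - a
    · refine ⟨(p.1 - a, p.2), List.mem_flatMap.mpr ⟨p, hp, ?_⟩, by omega, by omega, h3⟩
      unfold pvCand; rw [if_pos hbr]; simp
    · refine ⟨(p.1 + a, max p.2 (p.1 + a)), List.mem_flatMap.mpr ⟨p, hp, by simp [pvCand]⟩,
        by omega, by omega, ?_⟩
      rcases max_cases p.2 (p.1 + a) with ⟨hm, _⟩ | ⟨hm, _⟩ <;> omega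

theorem pvBsA_spec {nums : List Int}
    (hmono : ∀ a b : Int, a ≤ b → pvCheckA nums a = true → pvCheckA nums b = true) :
    ∀ l r : Int, 0 ≤ l → (∀ m, 0 ≤ m → m < l → pvCheckA nums m = false) →
    (∀ m, r < m → pvCheckA nums m = true) →
    0 ≤ pvBsA nums l r ∧ pvCheckA nums (pvBsA nums l r) = true ∧
      ∀ m, 0 ≤ m → m < pvBsA nums l r → pvCheckA nums m = false := by
  intro l r
  induction l, r using pvBsA.induct nums with
  | case1 l r h mid hc ih =>
    intro hl hlow hhigh
    rw [pvBsA, dif_pos h, if_pos hc]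
    have hmb := PySem.Int.floordiv_two_mid_bounds h
    exact ih hl hlow (fun m hm => hmono mid m (by omega) hc)
  | case2 l r h mid hc ih =>
    intro hl hlow hhigh
    rw [pvBsA, dif_pos h, if_neg hc]
    have hmb := PySem.Int.floordiv_two_mid_bounds h
    refine ih (by omega) ?_ hhigh
    intro m hm0 hmlt
    by_cases hml : m < l
    · exact hlow m hm0 hml
    · by_contra hne
      have : pvCheckA nums m = true := by
        cases hb : pvCheckA nums m with
        | true => rfl
        | false => exact absurd hb hne
      exact absurd (hmono m mid (by omega) this) hc
  | case3 l r h =>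
    intro hl hlow hhigh
    rw [pvBsA, dif_neg h]
    exact ⟨hl, hhigh l (by omega), fun m hm0 hmlt => hlow m hm0 hmlt⟩

theorem pvIns_cases (cap : Int) (d : PySem.Dict Int Int) (c : Int × Int) :
    (pvIns cap d c = d.insert c.1 c.2 ∧ c.2 ≤ cap ∧
      (∀ v, d.get? c.1 = some v → c.2 < v)) ∨
    (pvIns cap d c = d ∧ ((∃ v, d.get? c.1 = some v ∧ v ≤ c.2) ∨ ¬ c.2 ≤ cap)) := by
  by_cases hcap : c.2 ≤ cap
  · cases hg : d.get? c.1 with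
    | none =>
      left
      refine ⟨?_, hcap, ?_⟩
      · unfold pvIns; rw [if_pos hcap, hg]
      · intro v hv; simp at hv
    | some v =>
      by_cases hlt : c.2 < v
      · left
        refine ⟨?_, hcap, ?_⟩
        · unfold pvIns; rw [if_pos hcap, hg]; simp [hlt]
        · intro v' hv'
          have h' := Option.some.inj hv'
          omega
      · right
        refine ⟨?_, Or.inl ⟨v, rfl, by omega⟩⟩
        unfold pvIns; rw [if_pos hcap, hg]; simp [hlt]
  · right
    refine ⟨?_, Or.inr hcap⟩
    unfold pvIns; rw [if_neg hcap]

theorem pvIns_mono {cap : Int} {d : PySem.Dict Int Int} {c : Int × Int} {k w : Int}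
    (h : d.get? k = some w) : ∃ w', (pvIns cap d c).get? k = some w' ∧ w' ≤ w := by
  rcases pvIns_cases cap d c with ⟨he, hcap, hv⟩ | ⟨he, _⟩
  · rw [he, PySem.Dict.get?_insert]
    by_cases hk : k = c.1
    · rw [if_pos hk]
      rw [hk] at h
      exact ⟨c.2, rfl, le_of_lt (hv w h)⟩
    · rw [if_neg hk]; exact ⟨w, h, le_refl w⟩
  · rw [he]; exact ⟨w, h, le_refl w⟩

theorem pvIns_new {cap : Int} {d : PySem.Dict Int Int} {c : Int × Int}
    (h : c.2 ≤ cap) : ∃ w, (pvIns cap d c).get? c.1 = some w ∧ w ≤ c.2 := by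
  rcases pvIns_cases cap d c with ⟨he, _, _⟩ | ⟨he, hv | hcap⟩
  · rw [he, PySem.Dict.get?_insert_self]; exact ⟨c.2, rfl, le_refl _⟩
  · obtain ⟨v, hv, hle⟩ := hv
    rw [he]; exact ⟨v, hv, hle⟩
  · exact absurd h hcap

theorem pvIns_entries {cap : Int} {d : PySem.Dict Int Int} {c : Int × Int} {k w : Int}
    (h : (pvIns cap d c).get? k = some w) :
    d.get? k = some w ∨ (k = c.1 ∧ w = c.2 ∧ c.2 ≤ cap) := by
  rcases pvIns_cases cap d c with ⟨he, hcap, _⟩ | ⟨he, _⟩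
  · rw [he, PySem.Dict.get?_insert] at h
    by_cases hk : k = c.1
    · rw [if_pos hk] at h; injection h with h'; exact Or.inr ⟨hk, h'.symm, hcap⟩
    · rw [if_neg hk] at h; exact Or.inl h
  · rw [he] at h; exact Or.inl h

theorem pvFoldIns_mono {cap : Int} :
    ∀ (L : List (Int × Int)) (d : PySem.Dict Int Int) (k w : Int),
      d.get? k = some w → ∃ w', (L.foldl (pvIns cap) d).get? k = some w' ∧ w' ≤ w := by
  intro L
  induction L with
  | nil => intro d k w h; exact ⟨w, h, le_refl w⟩
  | cons c t ih =>
    intro d k w h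
    obtain ⟨w1, h1, hle1⟩ := pvIns_mono (c := c) h
    obtain ⟨w2, h2, hle2⟩ := ih _ _ _ h1
    exact ⟨w2, h2, by omega⟩

theorem pvFoldIns_entries {cap : Int} :
    ∀ (L : List (Int × Int)) (d : PySem.Dict Int Int) (k w : Int),
      (L.foldl (pvIns cap) d).get? k = some w →
      d.get? k = some w ∨ ∃ c ∈ L, k = c.1 ∧ w = c.2 ∧ c.2 ≤ cap := by
  intro L
  induction L with
  | nil => intro d k w h; exact Or.inl h
  | cons c t ih =>
    intro d k w h
    rcases ih _ _ _ h with h' | ⟨c', hc', h'⟩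
    · rcases pvIns_entries h' with h'' | h''
      · exact Or.inl h''
      · exact Or.inr ⟨c, List.mem_cons_self .., h''⟩
    · exact Or.inr ⟨c', List.mem_cons_of_mem _ hc', h'⟩

theorem pvFoldIns_reach {cap : Int} :
    ∀ (L : List (Int × Int)) (d : PySem.Dict Int Int) (c : Int × Int),
      c ∈ L → c.2 ≤ cap → ∃ w, (L.foldl (pvIns cap) d).get? c.1 = some w ∧ w ≤ c.2 := by
  intro L
  induction L with
  | nil => intro d c hc; cases hc
  | cons c0 t ih =>
    intro d c hc hcap
    rcases List.mem_cons.mp hc with rfl | hc'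
    · obtain ⟨w, hw, hle⟩ := pvIns_new (d := d) hcap
      obtain ⟨w', hw', hle'⟩ := pvFoldIns_mono t _ _ _ hw
      exact ⟨w', hw', by omega⟩
    · exact ih _ _ hc' hcap

theorem pvFoldIns_nodup {cap : Int} :
    ∀ (L : List (Int × Int)) (d : PySem.Dict Int Int),
      d.keys.Nodup → (L.foldl (pvIns cap) d).keys.Nodup := by
  intro L
  induction L with
  | nil => intro d h; exact h
  | cons c t ih =>
    intro d h
    refine ih _ ?_
    rcases pvIns_cases cap d c with ⟨he, _, _⟩ | ⟨he, _⟩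
    · rw [he]; exact PySem.Dict.nodup_keys_insert _ _ _ h
    · rw [he]; exact h

theorem pvItemsFold_mono {cap num : Int} :
    ∀ (its : List (Int × Int)) (e : PySem.Dict Int Int) (k w : Int),
      e.get? k = some w → ∃ w', (its.foldl (pvStepB cap num) e).get? k = some w' ∧ w' ≤ w := by
  intro its
  induction its with
  | nil => intro e k w h; exact ⟨w, h, le_refl w⟩
  | cons p t ih =>
    intro e k w h
    obtain ⟨w1, h1, hle1⟩ := pvFoldIns_mono (pvCand num p) e k w h
    obtain ⟨w2, h2, hle2⟩ := ih _ _ _ h1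
    exact ⟨w2, h2, by omega⟩

theorem pvItemsFold_entries {cap num : Int} :
    ∀ (its : List (Int × Int)) (e : PySem.Dict Int Int) (k w : Int),
      (its.foldl (pvStepB cap num) e).get? k = some w →
      e.get? k = some w ∨ ∃ p ∈ its, ∃ c ∈ pvCand num p, k = c.1 ∧ w = c.2 ∧ c.2 ≤ cap := by
  intro its
  induction its with
  | nil => intro e k w h; exact Or.inl h
  | cons p t ih =>
    intro e k w h
    rcases ih _ _ _ h with h' | ⟨p', hp', hc'⟩
    · rcases pvFoldIns_entries (pvCand num p) e k w h' with h'' | ⟨c, hc, h3⟩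
      · exact Or.inl h''
      · exact Or.inr ⟨p, List.mem_cons_self .., c, hc, h3⟩
    · exact Or.inr ⟨p', List.mem_cons_of_mem _ hp', hc'⟩

theorem pvItemsFold_reach {cap num : Int} :
    ∀ (its : List (Int × Int)) (e : PySem.Dict Int Int) (p c : Int × Int),
      p ∈ its → c ∈ pvCand num p → c.2 ≤ cap →
      ∃ w, (its.foldl (pvStepB cap num) e).get? c.1 = some w ∧ w ≤ c.2 := by
  intro its
  induction its with
  | nil => intro e p c hp; cases hp
  | cons p0 t ih =>
    intro e p c hp hc hcap
    rcases List.mem_cons.mp hp with rfl | hp'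
    · obtain ⟨w, hw, hle⟩ := pvFoldIns_reach (pvCand num p) e c hc hcap
      obtain ⟨w', hw', hle'⟩ := pvItemsFold_mono t _ _ _ hw
      exact ⟨w', hw', by omega⟩
    · exact ih _ _ _ hp' hc hcap

theorem pvItemsFold_nodup {cap num : Int} :
    ∀ (its : List (Int × Int)) (e : PySem.Dict Int Int),
      e.keys.Nodup → (its.foldl (pvStepB cap num) e).keys.Nodup := by
  intro its
  induction its with
  | nil => intro e h; exact h
  | cons p t ih => intro e h; exact ih _ (pvFoldIns_nodup (pvCand num p) e h)

theorem pvInv_step {cap num : Int} (hnum : 0 ≤ num) {dp : PySem.Dict Int Int}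
    {ps : List (Int × Int)} (hok : ∀ p ∈ ps, pvOk p) (hinv : pvInv cap dp ps) :
    pvInv cap (dp.items.foldl (pvStepB cap num) PySem.Dict.empty) (ps.flatMap (pvCand num)) := by
  obtain ⟨hnd, hent, hreach⟩ := hinv
  refine ⟨pvItemsFold_nodup _ _ (by simp [PySem.Dict.nodup_keys_empty]), ?_, ?_⟩
  · intro k w h
    rcases pvItemsFold_entries _ _ _ _ h with h' | ⟨p, hp, c, hc, rfl, rfl, hcap⟩
    · rw [PySem.Dict.get?_empty] at h'; cases h'
    · have hget : dp.get? p.1 = some p.2 := PySem.Dict.get?_of_mem_items dp (by simpa using hp) hnd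
      obtain ⟨hmem, _⟩ := hent _ _ hget
      refine ⟨List.mem_flatMap.mpr ⟨p, by simpa using hmem, ?_⟩, hcap⟩
      simpa using hc
  · intro q hq hqcap
    obtain ⟨p, hp, hqc⟩ := List.mem_flatMap.mp hq
    have hspan : p.2 ≤ q.2 := pvCand_span_mono hnum (hok p hp) q hqc
    obtain ⟨w, hw, hwle⟩ := hreach p hp (by omega)
    obtain ⟨c, hcmem, hck, hcs⟩ := pvCand_mono (o := p.1) (s := p.2) (s' := w) hwle q
      (by simpa using hqc)
    have hitem : (p.1, w) ∈ dp.items := PySem.Dict.mem_items_of_get?_eq_some dp hw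
    obtain ⟨w', hw', hwle'⟩ := pvItemsFold_reach (cap := cap) dp.items PySem.Dict.empty (p.1, w) c hitem hcmem
      (by omega)
    exact ⟨w', by rw [← hck]; exact hw', by omega⟩

theorem pvInv_run {cap : Int} :
    ∀ (nums : List Int) (ps : List (Int × Int)) (dp : PySem.Dict Int Int),
      (∀ n ∈ nums, 0 ≤ n) → (∀ p ∈ ps, pvOk p) → pvInv cap dp ps →
      pvInv cap
        (nums.foldl (fun dp num => dp.items.foldl (pvStepB cap num) PySem.Dict.empty) dp)
        (nums.foldl (fun ps n => ps.flatMap (pvCand n)) ps) := by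
  intro nums
  induction nums with
  | nil => intro ps dp _ _ h; exact h
  | cons a t ih =>
    intro ps dp hn hok hinv
    refine ih _ _ (fun n hn' => hn n (List.mem_cons_of_mem _ hn')) ?_
      (pvInv_step (hn a (List.mem_cons_self ..)) hok hinv)
    intro p hp
    obtain ⟨q, hq, hpq⟩ := List.mem_flatMap.mp hp
    exact pvCand_ok (hn a (List.mem_cons_self ..)) (hok q hq) p hpq

theorem pvMain {nums : List Int} (hne : nums ≠ []) (hn : ∀ n ∈ nums, 0 ≤ n) :
    unSuitability nums = unSuitability_alt nums := by
  cases hmx : PySem.List.max? nums (fun x => x) with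
  | none => exact absurd ((PySem.List.max?_eq_none_iff ..).mp hmx) hne
  | some m =>
  have hmmem : m ∈ nums := PySem.List.max?_mem hmx
  have hmmax : ∀ y ∈ nums, y ≤ m := fun y hy => PySem.List.max?_isMax hmx y hy
  have hm0 : 0 ≤ m := hn m hmmem
  have hinv0 : pvInv (2 * m) (PySem.Dict.ofList [((0 : Int), (0 : Int))]) [(0, 0)] := by
    have hof : PySem.Dict.ofList [((0 : Int), (0 : Int))] = PySem.Dict.empty.insert 0 0 := by rfl
    refine ⟨by rw [hof]; exact PySem.Dict.nodup_keys_insert _ _ _ PySem.Dict.nodup_keys_empty,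
      ?_, ?_⟩
    · intro k w h
      rw [hof, PySem.Dict.get?_insert] at h
      split at h
      · next he =>
        injection h with h'
        subst he
        exact ⟨by simp [← h'], by omega⟩
      · rw [PySem.Dict.get?_empty] at h; cases h
    · intro p hp _
      simp only [List.mem_singleton] at hp
      subst hp
      rw [hof]
      exact ⟨0, by rw [PySem.Dict.get?_insert_self], le_refl 0⟩
  have hok0 : ∀ p ∈ [((0 : Int), (0 : Int))], pvOk p := by
    intro p hp; simp only [List.mem_singleton] at hp; subst hp; exact ⟨le_refl 0, le_refl 0⟩
  obtain ⟨hnd, hent, hreach⟩ := pvInv_run nums [(0, 0)] _ hn hok0 hinv0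
  obtain ⟨pstar, hpstar, _, _, hpscap⟩ :=
    pvProfs_cap hm0 nums [(0, 0)] (fun n hn' => ⟨hn n hn', hmmax n hn'⟩)
      ⟨(0, 0), List.mem_singleton_self _, le_refl 0, by omega, by omega⟩
  obtain ⟨w0, hw0, _⟩ := hreach pstar hpstar (by omega)
  have hv0 : w0 ∈ (nums.foldl (fun dp num => dp.items.foldl (pvStepB (2 * m) num) PySem.Dict.empty)
      (PySem.Dict.ofList [((0 : Int), (0 : Int))])).values :=
    List.mem_map.mpr ⟨(pstar.1, w0), PySem.Dict.mem_items_of_get?_eq_some _ hw0, rfl⟩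
  cases hmin : PySem.List.min? (nums.foldl (fun dp num => dp.items.foldl (pvStepB (2 * m) num) PySem.Dict.empty)
      (PySem.Dict.ofList [((0 : Int), (0 : Int))])).values (fun x => x) with
  | none => rw [(PySem.List.min?_eq_none_iff ..).mp hmin] at hv0; cases hv0
  | some vm =>
  obtain ⟨⟨kk, ww⟩, hkv, hww⟩ := List.mem_map.mp (PySem.List.min?_mem hmin)
  have hww' : ww = vm := hww
  subst hww'
  have hgetvm : (nums.foldl (fun dp num => dp.items.foldl (pvStepB (2 * m) num) PySem.Dict.empty)
      (PySem.Dict.ofList [((0 : Int), (0 : Int))])).get? kk = some ww :=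
    PySem.Dict.get?_of_mem_items _ hkv hnd
  obtain ⟨hvm_prof, hvm_cap⟩ := hent kk ww hgetvm
  have hvm_min : ∀ p ∈ pvProfs nums, p.2 ≤ 2 * m → ww ≤ p.2 := by
    intro p hp hpc
    obtain ⟨w, hw, hwle⟩ := hreach p hp hpc
    have hwv : w ∈ (nums.foldl (fun dp num => dp.items.foldl (pvStepB (2 * m) num) PySem.Dict.empty)
        (PySem.Dict.ofList [((0 : Int), (0 : Int))])).values :=
      List.mem_map.mpr ⟨(p.1, w), PySem.Dict.mem_items_of_get?_eq_some _ hw, rfl⟩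
    have := PySem.List.min?_isMin hmin w hwv
    omega
  have hvm0 : 0 ≤ ww := by
    obtain ⟨h1, h2⟩ := pvProfs_ok hn (kk, ww) hvm_prof
    simp only at h1 h2
    omega
  have hcheckcap : pvCheckA nums (m * 2) = true :=
    (pvCheckA_iff hn (by omega)).mpr ⟨pstar, hpstar, by omega⟩
  obtain ⟨hR0, hRc, hRleast⟩ := pvBsA_spec (fun a b hab h => pvCheckA_mono hn hab h) 0 (m * 2)
    (le_refl 0) (fun m' h1 h2 => absurd h1 (by omega))
    (fun m' hm' => pvCheckA_mono hn (by omega) hcheckcap)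
  have hRle : pvBsA nums 0 (m * 2) ≤ ww := by
    by_contra hlt
    have hcvm : pvCheckA nums ww = true :=
      (pvCheckA_iff hn hvm0).mpr ⟨(kk, ww), hvm_prof, le_refl ww⟩
    rw [hRleast ww hvm0 (by omega)] at hcvm
    cases hcvm
  have hvmle : ww ≤ pvBsA nums 0 (m * 2) := by
    obtain ⟨p, hp, hpR⟩ := (pvCheckA_iff hn hR0).mp hRc
    exact le_trans (hvm_min p hp (by omega)) hpR
  show unSuitability nums = unSuitability_alt nums
  unfold unSuitability unSuitability_alt
  rw [hmx]
  simp only [Option.getD_some]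
  rw [hmin, Option.getD_some]
  omega

-- ===== VERDICT (by name: the statement is the Claim_ definition above) =====
theorem unSuitability_spec : Claim_equal_unSuitability := by
  intro nums _ hpre
  unfold Spec_unSuitability
  exact pvMain hpre.1 hpre.2
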